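-- pv_equiv track=rewrite | github.com/beloslavamalakova/MM | VerticesOfVengence.py | find_overlapping_vertices
-- ===== SOURCE A (Python) =====
-- def find_overlapping_vertices(c4_cycles):
--     vertex_count = {}
--
--     # Count occurrences of each vertex across all c4_cycles
--     for subgraph in c4_cycles:
--         for vertex in subgraph:
--             if vertex in vertex_count:
--                 vertex_count[vertex] += 1
--             else:
--                 vertex_count[vertex] = 1
--
--     # Overlapping vertices appear in more than one subgraph
--     overlapping_vertices = {v for v, count in vertex_count.items() if count > 1}
--
--     return overlapping_vertices
-- ===== SOURCE B (Python) =====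
-- def find_overlapping_vertices(c4_cycles):
--     flat = [v for sg in c4_cycles for v in sg]
--     return {v for v in flat if flat.count(v) > 1}
-- ===== Notes on version B (the rewrite author's own statement) =====
-- stated objective: simpler
-- what changed: Drops the incrementally maintained frequency dictionary entirely: B flattens the subgraphs into one list and selects, by a direct flat.count(v) scan per vertex, those occurring more than once.
import Mathlib
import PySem

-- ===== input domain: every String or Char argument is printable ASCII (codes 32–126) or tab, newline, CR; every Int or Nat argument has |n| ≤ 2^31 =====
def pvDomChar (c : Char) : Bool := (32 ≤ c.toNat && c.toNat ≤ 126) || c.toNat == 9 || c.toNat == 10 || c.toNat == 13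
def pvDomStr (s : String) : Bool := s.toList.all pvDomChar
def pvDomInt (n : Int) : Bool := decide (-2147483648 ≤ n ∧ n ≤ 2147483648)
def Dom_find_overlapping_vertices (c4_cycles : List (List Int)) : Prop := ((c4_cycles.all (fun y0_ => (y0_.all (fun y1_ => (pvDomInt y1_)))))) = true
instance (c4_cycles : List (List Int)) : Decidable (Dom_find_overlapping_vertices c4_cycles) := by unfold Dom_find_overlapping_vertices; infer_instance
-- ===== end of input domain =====

-- B drops A's incrementally maintained frequency dict: it flattens the subgraphs and
-- keeps each vertex whose direct occurrence count in the flat list exceeds 1; objective: simpler.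

-- ===== PORT A =====
-- loop body of A's nested count loop: 'if vertex in vertex_count: +=1 else: =1'
def fovStepA (d : PySem.Dict Int Int) (vertex : Int) : PySem.Dict Int Int :=
  if d.contains vertex then d.insert vertex (d.getD vertex 0 + 1)
  else d.insert vertex 1

def find_overlapping_vertices (c4_cycles : List (List Int)) : List Int :=
  let vertex_count : PySem.Dict Int Int :=
    c4_cycles.foldl (fun d subgraph => subgraph.foldl fovStepA d) ⟨[]⟩
  -- {v for v, count in vertex_count.items() if count > 1}
  PySem.Set.ofList (((vertex_count.items.filter (fun p => decide (1 < p.2))).map Prod.fst))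

-- ===== PORT B =====
def find_overlapping_vertices_alt (c4_cycles : List (List Int)) : List Int :=
  -- flat = [v for sg in c4_cycles for v in sg]
  let flat := c4_cycles.flatten
  -- {v for v in flat if flat.count(v) > 1}
  PySem.Set.ofList (flat.filter (fun v => decide (1 < (PySem.List.count flat v : Int))))

-- ===== PRECONDITION & SPEC =====
def Spec_find_overlapping_vertices (c4_cycles : List (List Int)) (out : List Int) : Prop := out = find_overlapping_vertices_alt c4_cycles
instance (c4_cycles : List (List Int)) (out : List Int) : Decidable (Spec_find_overlapping_vertices c4_cycles out) := by unfold Spec_find_overlapping_vertices; infer_instance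

-- ===== CLAIM (what is proved, stated in full; the proofs are below) =====
def Claim_equal_find_overlapping_vertices : Prop := ∀ (c4_cycles : List (List Int)), Dom_find_overlapping_vertices c4_cycles → Spec_find_overlapping_vertices c4_cycles (find_overlapping_vertices c4_cycles)

-- ===== LEMMAS AND PROOFS =====

-- A's branching step is the unconditional 'insert v (getD v 0 + 1)' step of Counter
theorem fovStepA_eq (d : PySem.Dict Int Int) (v : Int) :
    fovStepA d v = d.insert v (d.getD v 0 + 1) := by
  unfold fovStepA
  by_cases h : d.contains v = true
  · simp [h]
  · have h' : d.contains v = false := Bool.eq_false_iff.mpr h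
    rw [if_neg (by simp [h']), PySem.Dict.getD_of_not_contains d 0 h']
    norm_num

-- hence A's dict is Counter(flat)
theorem fov_dict_eq (l : List Int) :
    l.foldl fovStepA (⟨[]⟩ : PySem.Dict Int Int) = PySem.Dict.counter l := by
  have hfun : fovStepA = fun (d : PySem.Dict Int Int) (x : Int) => d.insert x (d.getD x 0 + 1) :=
    funext fun d => funext fun v => fovStepA_eq d v
  rw [hfun, show (⟨[]⟩ : PySem.Dict Int Int) = PySem.Dict.empty from rfl,
    PySem.Dict.foldl_insert_getD_add_one_eq_counter]

-- set-comprehension dedup commutes with filtering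
theorem ofList_filter (l : List Int) (p : Int → Bool) :
    PySem.Set.ofList (l.filter p) = (PySem.Set.ofList l).filter p := by
  induction l using List.reverseRecOn with
  | nil => rfl
  | append_singleton t a ih =>
    rw [List.filter_append, PySem.Set.ofList_append_singleton]
    cases hp : p a with
    | false =>
      simp only [List.filter_cons, hp, Bool.false_eq_true, if_false, List.filter_nil,
        List.append_nil, ih, PySem.Set.add]
      split_ifs with h
      · rfl
      · simp [List.filter_append, hp]
    | true =>
      simp only [List.filter_cons, hp, if_pos, List.filter_nil,
        PySem.Set.ofList_append_singleton, ih, PySem.Set.add]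
      by_cases hm : a ∈ t <;>
        simp [hm, hp, List.filter_append, List.mem_filter,
          PySem.Set.mem_ofList]

theorem find_overlapping_vertices_spec : Claim_equal_find_overlapping_vertices := by
  intro c4 _
  unfold Spec_find_overlapping_vertices find_overlapping_vertices find_overlapping_vertices_alt
  simp only [← List.foldl_flatten, fov_dict_eq, PySem.Dict.items_counter,
    PySem.List.count_eq]
  rw [List.filter_map, List.map_map, ofList_filter]
  have h1 : (Prod.fst ∘ fun k => (k, (List.count k c4.flatten : Int))) = id := rfl
  rw [h1, List.map_id]
  exact PySem.Set.ofList_eq_self_of_nodup _ ((PySem.Set.nodup_ofList _).filter _)
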